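-- pv_equiv track=rewrite | github.com/lehecht/Projektmodul | src/dashView/dashLayout.py | dropdownRange
-- ===== SOURCE A (Python) =====
-- def dropdownRange(min_val, max_val):
--     j = min_val
--     mark = []
--     i = 0
--     while i < 9:
--         if "5" in str(j):
--             j = j * 2
--         else:
--             j = j * 5
--
--         if j <= max_val:
--             mark.append({'label': str(j), 'value': str(i)})
--         else:
--             break
--         i += 1
--     mark.append({'label': 'all', 'value': 'all'})
--     return mark
-- ===== SOURCE B (Python) =====
-- def dropdownRange(min_val, max_val):
--     # Pure structural recursion on the remaining budget n (counting down from 9):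
--     # each call conses one mark in front of the rest; the terminal 'all' mark is
--     # the base case of the recursion, so no mutable accumulator or counter exists.
--     def marks(j, n):
--         if n == 0:
--             return [{'label': 'all', 'value': 'all'}]
--         j = j * 2 if "5" in str(j) else j * 5
--         if j > max_val:
--             return [{'label': 'all', 'value': 'all'}]
--         return [{'label': str(j), 'value': str(9 - n)}] + marks(j, n - 1)
--     return marks(min_val, 9)
-- ===== Notes on version B (the rewrite author's own statement) =====
-- stated objective: alternative
-- what changed: A's imperative while loop with a mutable accumulator, an explicit counter i and a trailing append of the 'all' mark is replaced by a pure structural recursion on the remaining budget that conses marks front-to-back, derives the index as 9 minus the remaining budget, and produces the 'all' mark as the recursion's base case.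
import Mathlib
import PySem

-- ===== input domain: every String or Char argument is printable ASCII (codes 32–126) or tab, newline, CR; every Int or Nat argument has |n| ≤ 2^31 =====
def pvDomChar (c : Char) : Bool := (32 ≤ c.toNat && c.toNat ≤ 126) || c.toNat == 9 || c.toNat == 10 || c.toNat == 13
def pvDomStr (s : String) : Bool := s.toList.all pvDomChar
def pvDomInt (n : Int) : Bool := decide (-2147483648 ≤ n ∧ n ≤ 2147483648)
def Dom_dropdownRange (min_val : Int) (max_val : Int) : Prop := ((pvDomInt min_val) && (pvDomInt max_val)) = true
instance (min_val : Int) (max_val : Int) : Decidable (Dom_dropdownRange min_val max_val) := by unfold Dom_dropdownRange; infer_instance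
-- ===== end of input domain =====

-- B replaces A's mutable-accumulator while loop (counter i, trailing 'all' append) by a pure
-- structural recursion on the remaining budget, consing marks with the 'all' mark as base case
-- (objective: alternative decomposition, same cost).

-- ===== PORT A =====
-- the while loop: fuel = remaining iterations (9 - i), i = the Python counter, mark = accumulator
def dropdownRangeLoop (fuel : Nat) (j : Int) (i : Int) (max_val : Int)
    (mark : List (List (String × String))) : List (List (String × String)) :=
  match fuel with
  | 0 => mark
  | Nat.succ n =>
    let j' := if PySem.Str.isIn "5" (PySem.Int.toStr j) then j * 2 else j * 5
    if j' ≤ max_val then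
      dropdownRangeLoop n j' (i + 1) max_val
        (mark ++ [[("label", PySem.Int.toStr j'), ("value", PySem.Int.toStr i)]])
    else mark

def dropdownRange (min_val : Int) (max_val : Int) : List (List (String × String)) :=
  dropdownRangeLoop 9 min_val 0 max_val [] ++ [[("label", "all"), ("value", "all")]]

-- ===== PORT B =====
-- marks(j, n): structural recursion on the remaining budget n; base case returns the 'all' mark
def dropdownRangeMarks (max_val : Int) (j : Int) (n : Nat) : List (List (String × String)) :=
  match n with
  | 0 => [[("label", "all"), ("value", "all")]]
  | Nat.succ m =>
    let j' := if PySem.Str.isIn "5" (PySem.Int.toStr j) then j * 2 else j * 5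
    if max_val < j' then [[("label", "all"), ("value", "all")]]
    else [[("label", PySem.Int.toStr j'), ("value", PySem.Int.toStr (9 - ((m : Int) + 1)))]]
      ++ dropdownRangeMarks max_val j' m

def dropdownRange_alt (min_val : Int) (max_val : Int) : List (List (String × String)) :=
  dropdownRangeMarks max_val min_val 9

-- ===== PRECONDITION & SPEC =====
def Spec_dropdownRange (min_val : Int) (max_val : Int) (out : List (List (String × String))) : Prop := out = dropdownRange_alt min_val max_val
instance (min_val : Int) (max_val : Int) (out : List (List (String × String))) : Decidable (Spec_dropdownRange min_val max_val out) := by unfold Spec_dropdownRange; infer_instance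

-- ===== CLAIM =====
def Claim_equal_dropdownRange : Prop := ∀ (min_val : Int) (max_val : Int), Dom_dropdownRange min_val max_val → Spec_dropdownRange min_val max_val (dropdownRange min_val max_val)

-- ===== LEMMAS AND PROOFS =====

-- A's accumulator loop (run with counter i = 9 - n) followed by the 'all' append
-- equals the accumulator prefixed to B's recursion on budget n.
theorem loop_eq_marks (max_val : Int) :
    ∀ (n : Nat) (j : Int) (mark : List (List (String × String))),
    dropdownRangeLoop n j (9 - (n : Int)) max_val mark ++ [[("label", "all"), ("value", "all")]] =
      mark ++ dropdownRangeMarks max_val j n := by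
  intro n
  induction n with
  | zero => intro j mark; simp [dropdownRangeLoop, dropdownRangeMarks]
  | succ m ih =>
    intro j mark
    simp only [dropdownRangeLoop, dropdownRangeMarks]
    by_cases h : (if PySem.Str.isIn "5" (PySem.Int.toStr j) = true then j * 2 else j * 5) ≤ max_val
    · have hi : (9 : Int) - ((m : Int) + 1) + 1 = 9 - (m : Int) := by ring
      have hc : ((Nat.succ m : Nat) : Int) = (m : Int) + 1 := by push_cast; ring
      simp only [if_pos h, if_neg (not_lt.mpr h), hc, hi, ih]
      simp [List.append_assoc]
    · simp only [if_neg h, if_pos (lt_of_not_ge h)]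

-- ===== VERDICT =====
theorem dropdownRange_spec : Claim_equal_dropdownRange := by
  intro min_val max_val _
  unfold Spec_dropdownRange dropdownRange dropdownRange_alt
  have := loop_eq_marks max_val 9 min_val []
  simpa using this
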